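-- pv_equiv track=rewrite | github.com/Gongsta/qc | main.py | _split_into_episodes
-- ===== SOURCE A (Python) =====
-- def _split_into_episodes(terminals):
--     """
--     Split dataset into episodes based on terminals array.
--     Returns list of episode index ranges [start, end).
--     """
--     T = len(terminals)
--     if T == 0:
--         return []
--
--     starts = [0]
--     ends = []
--
--     for t in range(T):
--         if terminals[t] == 1.0 or terminals[t] == True:
--             ends.append(t+1)  # inclusive end
--             if t+1 < T:
--                 starts.append(t+1)  # next starts after terminal
--
--     if len(ends) < len(starts):
--         ends.append(T)
--
--     return list(zip(starts, ends))
-- ===== SOURCE B (Python) =====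
-- def _split_into_episodes(terminals):
--     """
--     Split dataset into episodes based on terminals array.
--     Returns list of episode index ranges [start, end).
--     """
--     T = len(terminals)
--
--     def next_terminal(t):
--         # scan forward to the next terminal flag (or T if none remains)
--         while t < T and not (terminals[t] == 1.0 or terminals[t] == True):
--             t += 1
--         return t
--
--     def go(start):
--         # emit one episode at a time, recursing on the rest of the dataset
--         if start >= T:
--             return []
--         t = next_terminal(start)
--         if t < T:
--             return [(start, t + 1)] + go(t + 1)
--         return [(start, T)]
--
--     return go(0)
-- ===== Notes on version B (the rewrite author's own statement) =====
-- stated objective: alternative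
-- what changed: B recurses episode-by-episode: an inner scan finds the next terminal flag and one (start, end) pair is emitted per recursive call, instead of A's single indexed loop maintaining parallel starts/ends lists reconciled by a final length comparison.
import Mathlib
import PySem

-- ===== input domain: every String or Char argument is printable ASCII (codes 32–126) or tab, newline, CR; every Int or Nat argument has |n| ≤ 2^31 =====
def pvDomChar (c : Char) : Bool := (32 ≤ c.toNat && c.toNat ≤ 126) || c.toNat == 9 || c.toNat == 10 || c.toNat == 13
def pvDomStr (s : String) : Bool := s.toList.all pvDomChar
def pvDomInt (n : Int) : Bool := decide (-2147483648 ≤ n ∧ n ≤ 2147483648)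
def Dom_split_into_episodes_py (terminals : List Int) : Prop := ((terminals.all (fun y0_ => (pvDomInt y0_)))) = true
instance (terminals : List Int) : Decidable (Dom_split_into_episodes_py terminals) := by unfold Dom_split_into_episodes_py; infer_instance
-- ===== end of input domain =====

-- B recurses episode-by-episode (inner scan to the next terminal) instead of A's single
-- indexed loop with parallel starts/ends lists (objective: alternative decomposition).

-- ===== PORT A =====
-- For an Int element x, Python's `x == 1.0 or x == True` holds exactly when x = 1.
def split_into_episodes_py (terminals : List Int) : List (Int × Int) :=
  let T : Int := terminals.length
  if terminals.length = 0 then []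
  else
    let p := (List.range terminals.length).foldl
      (fun (se : List Int × List Int) t =>
        if terminals.getD t 0 = 1 then
          (if (t : Int) + 1 < T then se.1 ++ [(t : Int) + 1] else se.1,
           se.2 ++ [(t : Int) + 1])
        else se) ([0], [])
    let ends := if p.2.length < p.1.length then p.2 ++ [T] else p.2
    p.1.zip ends

-- ===== PORT B =====
-- Source B's inner `while` scan for the next terminal flag
def findTerm (terminals : List Int) (t : Nat) : Nat :=
  if h : t < terminals.length then
    if terminals.getD t 0 = 1 then t else findTerm terminals (t + 1)
  else t
termination_by terminals.length - t
decreasing_by omega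

theorem findTerm_ge (terminals : List Int) (t : Nat) : t ≤ findTerm terminals t := by
  unfold findTerm
  split
  · split
    · exact le_refl t
    · exact le_trans (Nat.le_succ t) (findTerm_ge terminals (t + 1))
  · exact le_refl t
termination_by terminals.length - t
decreasing_by omega

-- Source B's recursive `go`: one episode per call
def goEp (terminals : List Int) (start : Nat) : List (Int × Int) :=
  if h : start < terminals.length then
    let t := findTerm terminals start
    if ht : t < terminals.length then
      ((start : Int), (t : Int) + 1) :: goEp terminals (t + 1)
    else [((start : Int), (terminals.length : Int))]
  else []
termination_by terminals.length - start
decreasing_by have := findTerm_ge terminals start; omega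

def split_into_episodes_py_alt (terminals : List Int) : List (Int × Int) :=
  goEp terminals 0

-- ===== PRECONDITION & SPEC =====
def Spec_split_into_episodes_py (terminals : List Int) (out : List (Int × Int)) : Prop := out = split_into_episodes_py_alt terminals
instance (terminals : List Int) (out : List (Int × Int)) : Decidable (Spec_split_into_episodes_py terminals out) := by unfold Spec_split_into_episodes_py; infer_instance

-- ===== CLAIM (what is proved, stated in full; the proofs are below) =====
def Claim_equal_split_into_episodes_py : Prop := ∀ (terminals : List Int), Dom_split_into_episodes_py terminals → Spec_split_into_episodes_py terminals (split_into_episodes_py terminals)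

-- ===== LEMMAS AND PROOFS =====

-- zip ignores the part of the left list beyond the right list's length
theorem zip_append_left_of_le {α β : Type} (xs zs : List α) (ys : List β)
    (h : ys.length ≤ xs.length) : (xs ++ zs).zip ys = xs.zip ys := by
  induction xs generalizing ys with
  | nil => cases ys with
    | nil => simp
    | cons b bs => simp at h
  | cons a as ih => cases ys with
    | nil => simp
    | cons b bs => simp_all [List.zip]

-- A's loop over range n, unrolled into filter/map form
theorem loopA_eq (terminals : List Int) (n : Nat) :
    (List.range n).foldl
      (fun (se : List Int × List Int) t =>
        if terminals.getD t 0 = 1 then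
          (if (t : Int) + 1 < (terminals.length : Int) then se.1 ++ [(t : Int) + 1] else se.1,
           se.2 ++ [(t : Int) + 1])
        else se) ([0], [])
    = (0 :: ((List.range n).filter
              (fun t => terminals.getD t 0 == 1 && decide ((t : Int) + 1 < (terminals.length : Int)))).map
              (fun t : Nat => (t : Int) + 1),
       ((List.range n).filter (fun t => terminals.getD t 0 == 1)).map (fun t : Nat => (t : Int) + 1)) := by
  induction n with
  | zero => simp
  | succ m ih =>
    rw [List.range_succ, List.foldl_append, ih]
    simp only [List.foldl_cons, List.foldl_nil, List.filter_append, List.map_append,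
      List.filter_cons, List.filter_nil]
    by_cases h1 : terminals[m]?.getD 0 = 1
    · by_cases h2 : (m : Int) + 1 < (terminals.length : Int) <;> simp [h1, h2]
    · simp [h1]

-- the boundary tail that B's recursion produces from position `start`
def tailB (terminals : List Int) (start : Nat) : List Int :=
  (((List.range' start (terminals.length - start)).filter
      (fun t => terminals.getD t 0 == 1)).map (fun t : Nat => (t : Int) + 1)) ++
  (if terminals.getD (terminals.length - 1) 0 = 1 then [] else [(terminals.length : Int)])

-- first-match decomposition of the filtered index range at findTerm
theorem filter_range'_findTerm (terminals : List Int) (start : Nat) :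
    (List.range' start (terminals.length - start)).filter (fun t => terminals.getD t 0 == 1) =
    if findTerm terminals start < terminals.length then
      findTerm terminals start ::
        (List.range' (findTerm terminals start + 1)
          (terminals.length - (findTerm terminals start + 1))).filter
          (fun t => terminals.getD t 0 == 1)
    else [] := by
  by_cases hlt : start < terminals.length
  · have hr : terminals.length - start = (terminals.length - (start + 1)) + 1 := by omega
    by_cases hp : terminals.getD start 0 = 1
    · rw [findTerm, dif_pos hlt, if_pos hp, if_pos hlt, hr, List.range'_succ]
      have hp' : terminals[start]?.getD 0 = 1 := by simpa [List.getD_eq_getElem?_getD] using hp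
      simp [List.filter_cons, hp']
    · rw [findTerm, dif_pos hlt, if_neg hp, hr, List.range'_succ]
      have hp' : ¬ terminals[start]?.getD 0 = 1 := by simpa [List.getD_eq_getElem?_getD] using hp
      rw [List.filter_cons, if_neg (by simpa using hp')]
      exact filter_range'_findTerm terminals (start + 1)
  · rw [findTerm, dif_neg hlt, if_neg hlt]
    have hr : terminals.length - start = 0 := by omega
    rw [hr]
    simp
termination_by terminals.length - start
decreasing_by omega

-- if findTerm lands in range, it found a terminal
theorem findTerm_hit (terminals : List Int) (start : Nat)
    (h : findTerm terminals start < terminals.length) :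
    terminals.getD (findTerm terminals start) 0 = 1 := by
  by_cases hlt : start < terminals.length
  · by_cases hp : terminals.getD start 0 = 1
    · rw [findTerm, dif_pos hlt, if_pos hp]
      exact hp
    · rw [findTerm, dif_pos hlt, if_neg hp] at h ⊢
      exact findTerm_hit terminals (start + 1) h
  · rw [findTerm, dif_neg hlt] at h
    omega
termination_by terminals.length - start
decreasing_by omega

-- B's recursion computes the zip of the boundary list with its tail
theorem goEp_eq (terminals : List Int) (start : Nat) (h : start < terminals.length) :
    goEp terminals start =
      (((start : Int)) :: tailB terminals start).zip (tailB terminals start) := by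
  rw [goEp]
  rw [dif_pos h]
  have hdec := filter_range'_findTerm terminals start
  by_cases ht : findTerm terminals start < terminals.length
  · rw [dif_pos ht]
    have hhit := findTerm_hit terminals start ht
    rw [if_pos ht] at hdec
    have htail : tailB terminals start =
        ((findTerm terminals start : Int) + 1) :: tailB terminals (findTerm terminals start + 1) := by
      unfold tailB
      rw [hdec]
      simp
    by_cases ht1 : findTerm terminals start + 1 < terminals.length
    · rw [goEp_eq terminals (findTerm terminals start + 1) ht1]
      rw [htail, List.zip_cons_cons]
      push_cast
      rfl
    · -- findTerm = length - 1 : last element is a terminal, recursion below returns []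
      have hlast : findTerm terminals start = terminals.length - 1 := by omega
      have : goEp terminals (findTerm terminals start + 1) = [] := by
        rw [goEp, dif_neg (by omega)]
      rw [this, htail]
      unfold tailB
      have h0 : terminals.length - (findTerm terminals start + 1) = 0 := by omega
      rw [h0]
      rw [if_pos (by rw [← hlast]; exact hhit)]
      simp only [List.range', List.filter_nil, List.map_nil, List.nil_append, List.append_nil]
      have : ((findTerm terminals start : Int) + 1) = (terminals.length : Int) := by omega
      rw [this, List.zip_cons_cons]
      simp
  · rw [dif_neg ht]
    rw [if_neg ht] at hdec
    -- no terminal from start on; in particular the last element is not a terminal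
    have hlastmem : (terminals.length - 1) ∈ List.range' start (terminals.length - start) := by
      rw [List.mem_range'_1]; omega
    have hlastnot : ¬ terminals.getD (terminals.length - 1) 0 = 1 := by
      intro hc
      have : (terminals.length - 1) ∈
          (List.range' start (terminals.length - start)).filter
            (fun t => terminals.getD t 0 == 1) := by
        rw [List.mem_filter]; exact ⟨hlastmem, by simpa using hc⟩
      rw [hdec] at this
      simp at this
    have htail : tailB terminals start = [(terminals.length : Int)] := by
      unfold tailB
      rw [hdec, if_neg hlastnot]
      simp
    rw [htail, List.zip_cons_cons]
    simp
termination_by terminals.length - start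
decreasing_by have := findTerm_ge terminals start; omega

-- ===== VERDICT (by name: the statement is the Claim_ definition above) =====
theorem split_into_episodes_py_spec : Claim_equal_split_into_episodes_py := by
  intro terminals _
  unfold Spec_split_into_episodes_py split_into_episodes_py split_into_episodes_py_alt
  rcases Nat.eq_zero_or_pos terminals.length with h0 | hpos
  · rw [if_pos h0, goEp, dif_neg (by omega)]
  · obtain ⟨m, hm⟩ := Nat.exists_eq_succ_of_ne_zero (Nat.pos_iff_ne_zero.mp hpos)
    rw [goEp_eq terminals 0 hpos]
    simp only [loopA_eq]
    rw [if_neg (by omega)]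
    have hrange : List.range' 0 (terminals.length - 0) = List.range terminals.length := by
      rw [Nat.sub_zero, List.range_eq_range']
    unfold tailB
    rw [hrange]
    rw [hm, List.range_succ]
    simp only [List.filter_append, List.map_append]
    have hsf : List.filter (fun t => terminals.getD t 0 == 1 && decide ((t : Int) + 1 < ((m.succ : Nat) : Int))) (List.range m)
        = List.filter (fun t => terminals.getD t 0 == 1) (List.range m) := by
      apply List.filter_congr
      intro t ht
      have ht' := List.mem_range.mp ht
      simp [ht']
    have hsm : List.filter (fun t => terminals.getD t 0 == 1 && decide ((t : Int) + 1 < ((m.succ : Nat) : Int))) [m] = [] := by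
      simp
    rw [hsf, hsm]
    set c0 := List.map (fun t : Nat => (t : Int) + 1) (List.filter (fun t => terminals.getD t 0 == 1) (List.range m)) with hc0
    have hmm : m.succ - 1 = m := rfl
    by_cases hc : terminals.getD m 0 = 1
    · have hc' : terminals[m]?.getD 0 = 1 := by simpa [List.getD_eq_getElem?_getD] using hc
      have hem : List.filter (fun t => terminals.getD t 0 == 1) [m] = [m] := by simp [hc']
      rw [hem]
      rw [hmm, if_pos hc]
      simp only [List.map_cons, List.map_nil, List.append_nil]
      rw [if_neg (by simp)]
      show (0 :: c0).zip (c0 ++ [(m : Int) + 1]) = (((0 : Int) :: c0) ++ [(m : Int) + 1]).zip (c0 ++ [(m : Int) + 1])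
      rw [zip_append_left_of_le _ _ _ (by simp)]
    · have hc' : ¬ terminals[m]?.getD 0 = 1 := by simpa [List.getD_eq_getElem?_getD] using hc
      have hem : List.filter (fun t => terminals.getD t 0 == 1) [m] = [] := by simp [hc']
      rw [hem]
      rw [hmm, if_neg hc]
      simp only [List.map_nil, List.append_nil]
      rw [if_pos (by simp)]
      show (0 :: c0).zip (c0 ++ [((m.succ : Nat) : Int)]) = (((0 : Int) :: c0) ++ [((m.succ : Nat) : Int)]).zip (c0 ++ [((m.succ : Nat) : Int)])
      rw [zip_append_left_of_le _ _ _ (by simp)]
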